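-- pv_equiv track=rewrite | github.com/caitlinadams/advent-of-code | aoc_2023/day_01/problem_02.py | get_numbers_words_digits
-- ===== SOURCE A (Python) =====
-- def find_all(substring, string):
--     """Generator that yields the index of the substring in the string"""
--     i = string.find(substring)
--     while i != -1:
--         yield i
--         i = string.find(substring, i + 1)
--
-- def get_numbers_words_digits(calibration_text: str) -> list:
--     """Get a list of digits from a calibration string"""
--     number_words = {
--         "zero": 0,
--         "one": 1,
--         "two": 2,
--         "three": 3,
--         "four": 4,
--         "five": 5,
--         "six": 6,
--         "seven": 7,
--         "eight": 8,
--         "nine": 9,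
--     }
--
--     valid_number_strings = list(number_words.keys()) + [
--         str(number) for number in list(number_words.values())
--     ]
--
--     numbers = [
--         (i, p)
--         for p in valid_number_strings
--         for i in find_all(p, calibration_text)
--         if p in calibration_text
--     ]
--
--     sorted_numbers = [number for (index, number) in sorted(numbers, key=lambda x: x[0])]
--
--     sorted_numbers_decimal = [
--         number_words[number] if number in number_words else int(number)
--         for number in sorted_numbers
--     ]
--
--     return sorted_numbers_decimal
-- ===== SOURCE B (Python) =====
-- def get_numbers_words_digits(calibration_text: str) -> list:
--     """Get a list of digits from a calibration string (single left-to-right scan)"""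
--     words = ["zero", "one", "two", "three", "four", "five",
--              "six", "seven", "eight", "nine"]
--     result = []
--     for i in range(len(calibration_text)):
--         ch = calibration_text[i]
--         if ch.isdigit():
--             result.append(ord(ch) - 48)
--         else:
--             for value, word in enumerate(words):
--                 if calibration_text.startswith(word, i):
--                     result.append(value)
--                     break
--     return result
-- ===== Notes on version B (the rewrite author's own statement) =====
-- stated objective: simpler
-- what changed: A runs str.find repeatedly for each of the 20 patterns, collects (index, pattern) pairs and sorts them by index; B does one left-to-right scan over the positions, emitting the digit or the unique number word that starts at each position, so the sort and the per-pattern scans disappear.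
import Mathlib
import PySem

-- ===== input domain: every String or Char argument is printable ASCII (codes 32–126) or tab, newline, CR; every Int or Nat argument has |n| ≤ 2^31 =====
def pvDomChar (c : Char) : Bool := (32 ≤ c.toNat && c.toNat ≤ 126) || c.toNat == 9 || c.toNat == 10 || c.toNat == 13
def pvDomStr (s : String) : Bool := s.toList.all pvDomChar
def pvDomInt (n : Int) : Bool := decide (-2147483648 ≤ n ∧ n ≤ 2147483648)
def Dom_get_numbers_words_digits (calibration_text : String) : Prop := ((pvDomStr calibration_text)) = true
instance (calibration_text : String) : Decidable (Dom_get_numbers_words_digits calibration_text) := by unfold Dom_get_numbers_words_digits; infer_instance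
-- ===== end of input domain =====

-- B replaces A's per-pattern find_all scans plus a sort by a single left-to-right scan that
-- classifies each position directly (objective: simpler — no sorting step, one pass over the text).

-- ===== PORT A =====
-- number_words dict (insertion order as in the Python literal)
def pvNumberWords : PySem.Dict (List Char) Int :=
  PySem.Dict.ofList
    [(['z','e','r','o'], 0), (['o','n','e'], 1), (['t','w','o'], 2),
     (['t','h','r','e','e'], 3), (['f','o','u','r'], 4), (['f','i','v','e'], 5),
     (['s','i','x'], 6), (['s','e','v','e','n'], 7), (['e','i','g','h','t'], 8),
     (['n','i','n','e'], 9)]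

-- valid_number_strings = list(number_words.keys()) + [str(v) for v in number_words.values()]
def pvValidNumberStrings : List (List Char) :=
  pvNumberWords.keys ++ pvNumberWords.values.map PySem.Int.toChars

-- find_all: i = string.find(substring, start); while i != -1: yield i; i = find(substring, i+1).
-- The inner dite is only a termination guard (always true when the find succeeds on a nonempty pattern).
def pvFindAllAux (sub cs : List Char) (start : Nat) : List Int :=
  let i := PySem.Chars.findFrom cs sub (start : Int)
  if i = -1 then []
  else if h : start ≤ i.toNat ∧ i.toNat < cs.length then
    i :: pvFindAllAux sub cs (i.toNat + 1)
  else []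
termination_by cs.length - start
decreasing_by omega

def pvFindAll (sub cs : List Char) : List Int := pvFindAllAux sub cs 0

-- number_words[number] if number in number_words else int(number)
-- (int(number) is only reached on the single-digit strings "0".."9", where ofChars? is some)
def pvToDecimal (p : List Char) : Int :=
  match pvNumberWords.get? p with
  | some v => v
  | none => (PySem.Int.ofChars? p).getD 0

def get_numbers_words_digits (calibration_text : String) : List Int :=
  let cs := calibration_text.toList
  let numbers := pvValidNumberStrings.flatMap (fun p =>
    (pvFindAll p cs).flatMap (fun i =>
      if PySem.Chars.isIn p cs then [(i, p)] else []))
  let sorted_numbers := (PySem.List.sorted numbers (fun x => x.1)).map (fun x => x.2)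
  sorted_numbers.map pvToDecimal

-- ===== PORT B =====
-- enumerate(words) as an explicit (value, word) list
def pvWordPairs : List (Int × List Char) :=
  [(0, ['z','e','r','o']), (1, ['o','n','e']), (2, ['t','w','o']),
   (3, ['t','h','r','e','e']), (4, ['f','o','u','r']), (5, ['f','i','v','e']),
   (6, ['s','i','x']), (7, ['s','e','v','e','n']), (8, ['e','i','g','h','t']),
   (9, ['n','i','n','e'])]

-- for value, word in enumerate(words): if text.startswith(word, i): append value; break
-- text.startswith(word, i) is ported as startswith on (drop i text): exact for 0 ≤ i (here i < len).
def pvWordLoop (cs : List Char) (i : Nat) : List (Int × List Char) → List Int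
  | [] => []
  | (v, w) :: rest =>
    if PySem.Chars.startswith (List.drop i cs) w then [v]
    else pvWordLoop cs i rest

-- body of B's loop for one index i (i comes from range(len(text)), so s[i] is in range)
def pvScanAt (cs : List Char) (i : Nat) : List Int :=
  let c := PySem.List.pyGetD cs (i : Int) ' '
  if PySem.Chars.isdigit c then [(c.toNat : Int) - 48]
  else pvWordLoop cs i pvWordPairs

def get_numbers_words_digits_alt (calibration_text : String) : List Int :=
  let cs := calibration_text.toList
  (List.range cs.length).foldl (fun acc i => acc ++ pvScanAt cs i) []

-- ===== PRECONDITION & SPEC =====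
def Spec_get_numbers_words_digits (calibration_text : String) (out : List Int) : Prop := out = get_numbers_words_digits_alt calibration_text
instance (calibration_text : String) (out : List Int) : Decidable (Spec_get_numbers_words_digits calibration_text out) := by unfold Spec_get_numbers_words_digits; infer_instance

-- ===== CLAIM (what is proved, stated in full; the proofs are below) =====
def Claim_equal_get_numbers_words_digits : Prop := ∀ (calibration_text : String), Dom_get_numbers_words_digits calibration_text → Spec_get_numbers_words_digits calibration_text (get_numbers_words_digits calibration_text)

-- ===== LEMMAS AND PROOFS =====

-- the common normal form both programs are reduced to: for each index, the values of the
-- patterns that start there, in index order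
def pvCanon (cs : List Char) : List Int :=
  (List.range cs.length).flatMap (fun j =>
    (pvValidNumberStrings.filter (fun p => p.isPrefixOf (List.drop j cs))).map pvToDecimal)

-- concrete facts about the 20 patterns
lemma pats_ne_nil : ∀ p ∈ pvValidNumberStrings, p ≠ [] := by decide

lemma pats_nodup : pvValidNumberStrings.Nodup := by decide

lemma pats_no_prefix : ∀ p ∈ pvValidNumberStrings, ∀ q ∈ pvValidNumberStrings, p <+: q → p = q := by
  have h : ∀ p ∈ pvValidNumberStrings, ∀ q ∈ pvValidNumberStrings, p.isPrefixOf q → p = q := by decide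
  intro p hp q hq hpq
  exact h p hp q hq (List.isPrefixOf_iff_prefix.mpr hpq)

-- at most one pattern starts at a given position
lemma filter_prefix_le_one (l : List (List Char)) (hnd : l.Nodup)
    (hpp : ∀ p ∈ l, ∀ q ∈ l, p <+: q → p = q) (t : List Char) :
    (l.filter (fun p => p.isPrefixOf t)).length ≤ 1 := by
  induction l with
  | nil => simp
  | cons p l ih =>
    rw [List.nodup_cons] at hnd
    by_cases hp : p.isPrefixOf t
    · have hed : l.filter (fun p => p.isPrefixOf t) = [] := by
        rw [List.filter_eq_nil_iff]
        intro q hq hq'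
        have hqp : q = p := by
          rcases List.prefix_or_prefix_of_prefix (List.isPrefixOf_iff_prefix.mp hq')
            (List.isPrefixOf_iff_prefix.mp hp) with h | h
          · exact hpp q (by simp [hq]) p (by simp) h
          · exact (hpp p (by simp) q (by simp [hq]) h).symm
        exact hnd.1 (hqp ▸ hq)
      simp [hp, hed]
    · simp only [List.filter_cons, hp, if_false, Bool.false_eq_true]
      exact ih hnd.2 (fun a ha b hb => hpp a (by simp [ha]) b (by simp [hb]))

-- prefix at j ≥ start implies infix of drop start
lemma prefix_drop_infix {sub cs : List Char} {start j : Nat} (hj : start ≤ j)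
    (h : sub <+: List.drop j cs) : sub <:+: List.drop start cs := by
  have heq : List.drop j cs = List.drop (j - start) (List.drop start cs) := by
    rw [List.drop_drop]; congr 1; omega
  rw [heq] at h
  exact h.isInfix.trans (List.drop_suffix _ _).isInfix

lemma prefix_lt_of_ne_nil {sub cs : List Char} {j : Nat} (hsub : sub ≠ [])
    (h : sub <+: List.drop j cs) : j < cs.length := by
  by_contra hc
  rw [List.drop_eq_nil_of_le (by omega)] at h
  exact hsub (List.prefix_nil.mp h)

-- characterization of find_all
lemma findAllAux_eq (sub cs : List Char) (hsub : sub ≠ []) (start : Nat)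
    (hstart : start ≤ cs.length) :
      pvFindAllAux sub cs start =
        ((List.range' start (cs.length - start)).filter
          (fun j => sub.isPrefixOf (List.drop j cs))).map (fun (j : Nat) => (j : Int)) := by
  fun_induction pvFindAllAux sub cs start with
  | case1 start i hi =>
    have hno := (PySem.Chars.findFrom_natCast_eq_neg_one_iff cs sub start hstart).mp hi
    have hfil : ((List.range' start (cs.length - start)).filter
        (fun j => sub.isPrefixOf (List.drop j cs))) = [] := by
      rw [List.filter_eq_nil_iff]
      intro j hj hpref
      have hjs : start ≤ j := by
        have := List.mem_range'.mp hj; omega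
      exact hno (prefix_drop_infix hjs (List.isPrefixOf_iff_prefix.mp hpref))
    rw [hfil]; rfl
  | case2 start i hi h ih =>
    obtain ⟨hle, hpref, hmin⟩ := PySem.Chars.findFrom_natCast_spec cs sub start hstart hi
    have hlt : i.toNat < cs.length := prefix_lt_of_ne_nil hsub hpref
    have hrange : List.range' start (cs.length - start) =
        List.range' start (i.toNat - start) ++ List.range' i.toNat (cs.length - i.toNat) := by
      have := @List.range'_append start (i.toNat - start) (cs.length - i.toNat) 1
      simp only [one_mul] at this
      rw [show start + (i.toNat - start) = i.toNat by omega] at this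
      rw [this]; congr 1; omega
    rw [hrange, List.filter_append]
    have h1 : (List.range' start (i.toNat - start)).filter
        (fun j => sub.isPrefixOf (List.drop j cs)) = [] := by
      rw [List.filter_eq_nil_iff]
      intro j hj hp
      have hj' := List.mem_range'.mp hj
      exact hmin j (by omega) (by omega) (List.isPrefixOf_iff_prefix.mp hp)
    have h2 : List.range' i.toNat (cs.length - i.toNat) =
        i.toNat :: List.range' (i.toNat + 1) (cs.length - (i.toNat + 1)) := by
      rw [show cs.length - i.toNat = (cs.length - (i.toNat + 1)) + 1 by omega, List.range'_succ]
    rw [h1, h2, List.nil_append]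
    have hb : sub.isPrefixOf (List.drop i.toNat cs) = true := List.isPrefixOf_iff_prefix.mpr hpref
    simp only [List.filter_cons, hb, if_true]
    rw [ih (by omega)]
    congr 1
    have h0 : (0:Int) ≤ i := le_trans (Int.natCast_nonneg start) hle
    show i = ((i.toNat : Nat) : Int)
    omega
  | case3 start i hi h =>
    obtain ⟨hle, hpref, hmin⟩ := PySem.Chars.findFrom_natCast_spec cs sub start hstart hi
    have hlt : i.toNat < cs.length := prefix_lt_of_ne_nil hsub hpref
    exact absurd ⟨by omega, hlt⟩ h

lemma findAll_eq (sub cs : List Char) (hsub : sub ≠ []) :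
    pvFindAll sub cs =
      ((List.range cs.length).filter (fun j => sub.isPrefixOf (List.drop j cs))).map
        (fun (j : Nat) => (j : Int)) := by
  have h := findAllAux_eq sub cs hsub 0 (Nat.zero_le _)
  simpa [pvFindAll, List.range_eq_range'] using h

-- generic permutation lemmas
lemma flatMap_append_perm {β γ : Type} (ys : List β) (g h : β → List γ) :
    (ys.flatMap fun b => g b ++ h b).Perm (ys.flatMap g ++ ys.flatMap h) := by
  induction ys with
  | nil => simp
  | cons y ys ih =>
    simp only [List.flatMap_cons, List.append_assoc]
    refine List.Perm.trans ((ih.append_left _).append_left _) ?_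
    exact ((List.perm_append_comm_assoc _ _ _)).append_left (g y)

lemma flatMap_ite_singleton {β γ : Type} (js : List β) (f : β → Bool) (g : β → γ) :
    (js.flatMap fun j => if f j then [g j] else []) = (js.filter f).map g := by
  induction js with
  | nil => rfl
  | cons j js ih => by_cases h : f j <;> simp [List.flatMap_cons, h, ih]

lemma swap_perm {α γ : Type} (xs : List α) (js : List Nat) (f : α → Nat → Bool)
    (mk : α → Nat → γ) :
    (xs.flatMap fun p => (js.filter (f p)).map (fun j => mk p j)).Perm
      (js.flatMap fun j => (xs.filter (fun p => f p j)).map (fun p => mk p j)) := by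
  induction xs with
  | nil => simp
  | cons p xs ih =>
    simp only [List.flatMap_cons, List.filter_cons]
    have hsplit : (js.flatMap fun j =>
        ((if f p j then p :: xs.filter (fun p => f p j) else xs.filter (fun p => f p j)).map
          (fun p => mk p j))) =
        js.flatMap fun j => ((if f p j then [mk p j] else []) ++
          ((xs.filter (fun p => f p j)).map (fun p => mk p j))) := by
      apply List.flatMap_congr
      intro j _
      by_cases h : f p j <;> simp [h]
    rw [hsplit]
    refine List.Perm.trans ?_ (flatMap_append_perm js _ _).symm
    rw [flatMap_ite_singleton]
    exact ih.append_left _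

lemma flatMap_pure_pair {α β : Type} (l : List α) (g : α → β) :
    (l.flatMap fun x => [g x]) = l.map g := by
  induction l with
  | nil => rfl
  | cons x l ih => simp [List.flatMap_cons, ih]

-- A's "numbers" list in flatMap-over-range form
lemma numbersA_eq (cs : List Char) :
    (pvValidNumberStrings.flatMap (fun p =>
      (pvFindAll p cs).flatMap (fun i =>
        if PySem.Chars.isIn p cs then [(i, p)] else []))) =
    (pvValidNumberStrings.flatMap fun p =>
      (((List.range cs.length).filter (fun j => p.isPrefixOf (List.drop j cs))).map
        (fun (j : Nat) => ((j : Int), p)))) := by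
  apply List.flatMap_congr
  intro p hp
  rw [findAll_eq p cs (pats_ne_nil p hp)]
  by_cases hin : PySem.Chars.isIn p cs
  · simp only [hin, if_true, List.flatMap_map, flatMap_pure_pair]
  · have hfil : (List.range cs.length).filter (fun j => p.isPrefixOf (List.drop j cs)) = [] := by
      rw [List.filter_eq_nil_iff]
      intro j _ hj
      have : PySem.Chars.isIn p cs = true := by
        rw [← PySem.Chars.exists_prefix_drop_iff_isIn]
        exact ⟨j, List.isPrefixOf_iff_prefix.mp hj⟩
      simp [this] at hin
    simp [hfil]

-- the canonical pair list and its strictly increasing keys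
lemma canon_pairs_pairwise (cs : List Char) :
    List.Pairwise (fun a b => a.1 < b.1)
      ((List.range cs.length).flatMap fun (j : Nat) =>
        ((pvValidNumberStrings.filter (fun p => p.isPrefixOf (List.drop j cs))).map
          (fun p => ((j : Int), p)))) := by
  rw [List.pairwise_flatMap]
  constructor
  · intro j _
    have hlen := filter_prefix_le_one pvValidNumberStrings pats_nodup pats_no_prefix
      (List.drop j cs)
    cases hml : (pvValidNumberStrings.filter
        (fun p => p.isPrefixOf (List.drop j cs))) with
    | nil => simp
    | cons a t =>
      cases t with
      | nil => simp
      | cons b t' => rw [hml] at hlen; simp at hlen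
  · refine List.Pairwise.imp ?_ List.pairwise_lt_range
    intro a b hab x hx y hy
    obtain ⟨xa, -, hx'⟩ := List.mem_map.mp hx
    obtain ⟨ya, -, hy'⟩ := List.mem_map.mp hy
    subst hx'; subst hy'
    show (a : Int) < (b : Int)
    exact_mod_cast hab

lemma A_eq_canon (cs : List Char) :
    (((PySem.List.sorted
        (pvValidNumberStrings.flatMap (fun p =>
          (pvFindAll p cs).flatMap (fun i =>
            if PySem.Chars.isIn p cs then [(i, p)] else [])))
        (fun x => x.1)).map (fun x => x.2)).map pvToDecimal) = pvCanon cs := by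
  rw [numbersA_eq]
  have hperm := swap_perm pvValidNumberStrings (List.range cs.length)
    (fun p j => p.isPrefixOf (List.drop j cs)) (fun p j => ((j : Int), p))
  rw [PySem.List.sorted_eq_of_perm_of_pairwise_lt _ _ (fun x => x.1) hperm.symm
    (canon_pairs_pairwise cs)]
  simp [pvCanon, List.map_flatMap, List.map_map, Function.comp_def]

-- B side
lemma wordpairs_vals : ∀ vw ∈ pvWordPairs, pvToDecimal vw.2 = vw.1 := by decide

lemma loop_vs_filter (cs : List Char) (i : Nat) (pairs : List (Int × List Char))
    (hval : ∀ vw ∈ pairs, pvToDecimal vw.2 = vw.1)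
    (hnd : (pairs.map Prod.snd).Nodup)
    (hpp : ∀ p ∈ pairs.map Prod.snd, ∀ q ∈ pairs.map Prod.snd, p <+: q → p = q) :
    ((pairs.map Prod.snd).filter (fun p => p.isPrefixOf (List.drop i cs))).map pvToDecimal
      = pvWordLoop cs i pairs := by
  induction pairs with
  | nil => rfl
  | cons vw rest ih =>
    obtain ⟨v, w⟩ := vw
    rw [List.map_cons, List.nodup_cons] at hnd
    by_cases hw : w.isPrefixOf (List.drop i cs)
    · have hrest : (rest.map Prod.snd).filter (fun p => p.isPrefixOf (List.drop i cs)) = [] := by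
        rw [List.filter_eq_nil_iff]
        intro q hq hq'
        have hqw : q = w := by
          rcases List.prefix_or_prefix_of_prefix (List.isPrefixOf_iff_prefix.mp hq')
            (List.isPrefixOf_iff_prefix.mp hw) with h | h
          · exact hpp q (by simp [hq]) w (by simp) h
          · exact (hpp w (by simp) q (by simp [hq]) h).symm
        exact hnd.1 (hqw ▸ hq)
      have hst : PySem.Chars.startswith (List.drop i cs) w = true :=
        (PySem.Chars.startswith_iff _ _).mpr (List.isPrefixOf_iff_prefix.mp hw)
      have hv : pvToDecimal w = v := hval (v, w) (by simp)
      simp [pvWordLoop, hst, hw, hrest, hv]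
    · have hst : PySem.Chars.startswith (List.drop i cs) w = false := by
        rw [Bool.eq_false_iff]
        intro hc
        exact hw (List.isPrefixOf_iff_prefix.mpr ((PySem.Chars.startswith_iff _ _).mp hc))
      simp only [List.map_cons, List.filter_cons, hw, if_false, Bool.false_eq_true,
        pvWordLoop, hst]
      exact ih (fun a ha => hval a (by simp [ha])) hnd.2
        (fun a ha b hb => hpp a (by simp [ha]) b (by simp [hb]))

lemma digit_char_cases {c : Char} (h : PySem.Chars.isdigit c = true) :
    c = '0' ∨ c = '1' ∨ c = '2' ∨ c = '3' ∨ c = '4' ∨ c = '5' ∨ c = '6' ∨ c = '7' ∨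
      c = '8' ∨ c = '9' := by
  have hb : 48 ≤ c.toNat ∧ c.toNat ≤ 57 := by
    simp [PySem.Chars.isdigit, Char.le_def, UInt32.le_iff_toNat_le] at h
    exact h
  have hc := Char.ofNat_toNat c
  have hd : c.toNat = 48 ∨ c.toNat = 49 ∨ c.toNat = 50 ∨ c.toNat = 51 ∨ c.toNat = 52 ∨
      c.toNat = 53 ∨ c.toNat = 54 ∨ c.toNat = 55 ∨ c.toNat = 56 ∨ c.toNat = 57 := by omega
  rcases hd with h'|h'|h'|h'|h'|h'|h'|h'|h'|h' <;> (rw [h'] at hc; subst hc; decide)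

lemma pats_split : pvValidNumberStrings =
    pvWordPairs.map Prod.snd ++
      [['0'], ['1'], ['2'], ['3'], ['4'], ['5'], ['6'], ['7'], ['8'], ['9']] := by decide

lemma words_nodup : (pvWordPairs.map Prod.snd).Nodup := by decide

lemma words_no_prefix : ∀ p ∈ pvWordPairs.map Prod.snd, ∀ q ∈ pvWordPairs.map Prod.snd,
    p <+: q → p = q := by
  have h : ∀ p ∈ pvWordPairs.map Prod.snd, ∀ q ∈ pvWordPairs.map Prod.snd,
      p.isPrefixOf q → p = q := by decide
  intro p hp q hq hpq
  exact h p hp q hq (List.isPrefixOf_iff_prefix.mpr hpq)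

lemma scan_eq (cs : List Char) (j : Nat) (hj : j < cs.length) :
    pvScanAt cs j =
      (pvValidNumberStrings.filter (fun p => p.isPrefixOf (List.drop j cs))).map pvToDecimal := by
  have hdrop : List.drop j cs = cs[j] :: List.drop (j + 1) cs := List.drop_eq_getElem_cons hj
  have hget : PySem.List.pyGetD cs (j : Int) ' ' = cs[j] := by
    rw [PySem.List.pyGetD_natCast, List.getD_eq_getElem cs ' ' hj]
  by_cases hdig : PySem.Chars.isdigit cs[j] = true
  · rcases digit_char_cases hdig with h|h|h|h|h|h|h|h|h|h <;>
      (simp only [pvScanAt, hget, hdrop, h, pats_split]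
       rw [if_pos (by decide)]
       simp [pvWordPairs, List.isPrefixOf]
       decide)
  · simp only [pvScanAt, hget, hdig]
    rw [pats_split, List.filter_append, List.map_append]
    have hdigfil : ([['0'], ['1'], ['2'], ['3'], ['4'], ['5'], ['6'], ['7'], ['8'],
        ['9']] : List (List Char)).filter (fun p => p.isPrefixOf (List.drop j cs)) = [] := by
      rw [List.filter_eq_nil_iff]
      intro q hq hq'
      rw [hdrop] at hq'
      fin_cases hq <;>
        (simp [List.isPrefixOf] at hq';
         rw [← hq'] at hdig; exact hdig (by decide))
    rw [hdigfil, List.map_nil, List.append_nil]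
    exact (loop_vs_filter cs j pvWordPairs wordpairs_vals words_nodup words_no_prefix).symm

lemma B_eq_canon (cs : List Char) :
    ((List.range cs.length).foldl (fun acc i => acc ++ pvScanAt cs i) []) = pvCanon cs := by
  rw [PySem.List.foldl_append_eq_flatMap]
  simp only [List.nil_append, pvCanon]
  apply List.flatMap_congr
  intro j hj
  exact scan_eq cs j (List.mem_range.mp hj)

-- ===== VERDICT (by name: the statement is the Claim_ definition above) =====
theorem get_numbers_words_digits_spec : Claim_equal_get_numbers_words_digits := by
  intro s _
  unfold Spec_get_numbers_words_digits get_numbers_words_digits get_numbers_words_digits_alt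
  rw [B_eq_canon, ← A_eq_canon]
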